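-- pv_equiv track=rewrite | github.com/RainerGa/AIExecutionGateway | monitor_live.py | parse_sse_block
-- ===== SOURCE A (Python) =====
-- def parse_sse_block(block: str) -> tuple[int | None, str | None, str | None]:
--     """Parse one SSE event block into id, type, and JSON payload string."""
--     event_id = None
--     event_type = None
--     data_parts: list[str] = []
--     for raw_line in block.splitlines():
--         line = raw_line.strip("\r")
--         if not line or line.startswith(":"):
--             continue
--         if line.startswith("id:"):
--             try:
--                 event_id = int(line[3:].strip())
--             except ValueError:
--                 event_id = None
--         elif line.startswith("event:"):
--             event_type = line[6:].strip() or None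
--         elif line.startswith("data:"):
--             data_parts.append(line[5:].strip())
--     if not data_parts and event_type is None and event_id is None:
--         return None, None, None
--     return event_id, event_type, "\n".join(data_parts) if data_parts else None
-- ===== SOURCE B (Python) =====
-- def parse_sse_block(block: str) -> tuple[int | None, str | None, str | None]:
--     """Parse one SSE event block into id, type, and JSON payload string."""
--     lines = [l.strip("\r") for l in block.splitlines()]
--     lines = [l for l in lines if l and not l.startswith(":")]
--     ids = [l[3:].strip() for l in lines if l.startswith("id:")]
--     events = [l[6:].strip() for l in lines if l.startswith("event:")]
--     data_parts = [l[5:].strip() for l in lines if l.startswith("data:")]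
--     event_id = None
--     if ids:
--         try:
--             event_id = int(ids[-1])
--         except ValueError:
--             event_id = None
--     event_type = (events[-1] or None) if events else None
--     data = "\n".join(data_parts) if data_parts else None
--     return event_id, event_type, data
-- ===== Notes on version B (the rewrite author's own statement) =====
-- stated objective: simpler
-- what changed: A's single dispatch loop with mutable last-writer state is replaced by building the filtered meaningful-line list once and extracting each field in its own independent pass (last id line, last event line, all data lines), dropping the redundant triple-None guard.
import Mathlib
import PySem

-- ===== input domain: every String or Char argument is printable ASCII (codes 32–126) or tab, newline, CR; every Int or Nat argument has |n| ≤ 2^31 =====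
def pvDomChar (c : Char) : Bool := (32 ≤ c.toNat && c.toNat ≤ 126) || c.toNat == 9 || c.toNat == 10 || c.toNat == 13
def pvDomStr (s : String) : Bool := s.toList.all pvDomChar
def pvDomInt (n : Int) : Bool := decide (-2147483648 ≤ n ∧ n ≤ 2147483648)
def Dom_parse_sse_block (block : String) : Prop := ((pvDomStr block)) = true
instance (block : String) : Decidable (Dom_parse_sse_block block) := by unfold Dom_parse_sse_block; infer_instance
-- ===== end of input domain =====

-- B replaces A's single dispatch loop by a filtered line list and one independent pass per
-- field (last id line, last event line, all data lines); objective: simpler decomposition.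

-- ===== PORT A =====
-- A-side helper: the body of A's for-loop over block.splitlines(), acting on the
-- accumulated (event_id, event_type, data_parts) state.
def parse_sse_step (st : Option Int × Option String × List String) (raw_line : String) :
    Option Int × Option String × List String :=
  let line := PySem.Str.stripChars raw_line "\r"
  if line == "" || PySem.Str.startswith line ":" then st
  else if PySem.Str.startswith line "id:" then
    (PySem.Int.ofStr? (PySem.Str.strip (PySem.Str.slice line (some 3) none)), st.2.1, st.2.2)
  else if PySem.Str.startswith line "event:" then
    let v := PySem.Str.strip (PySem.Str.slice line (some 6) none)
    (st.1, if v = "" then none else some v, st.2.2)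
  else if PySem.Str.startswith line "data:" then
    (st.1, st.2.1, st.2.2 ++ [PySem.Str.strip (PySem.Str.slice line (some 5) none)])
  else st

def parse_sse_block (block : String) : Option Int × Option String × Option String :=
  let st := (PySem.Str.splitlines block).foldl parse_sse_step (none, none, [])
  if st.2.2 = [] ∧ st.2.1 = none ∧ st.1 = none then (none, none, none)
  else (st.1, st.2.1, if st.2.2 = [] then none else some (PySem.Str.join "\n" st.2.2))

-- ===== PORT B =====
def parse_sse_block_alt (block : String) : Option Int × Option String × Option String :=
  let lines := ((PySem.Str.splitlines block).map (fun l => PySem.Str.stripChars l "\r")).filter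
      (fun l => !(l == "") && !PySem.Str.startswith l ":")
  let ids := (lines.filter (fun l => PySem.Str.startswith l "id:")).map
      (fun l => PySem.Str.strip (PySem.Str.slice l (some 3) none))
  let events := (lines.filter (fun l => PySem.Str.startswith l "event:")).map
      (fun l => PySem.Str.strip (PySem.Str.slice l (some 6) none))
  let data_parts := (lines.filter (fun l => PySem.Str.startswith l "data:")).map
      (fun l => PySem.Str.strip (PySem.Str.slice l (some 5) none))
  let event_id : Option Int :=
    match ids.getLast? with
    | none => none
    | some v => PySem.Int.ofStr? v
  let event_type : Option String :=
    match events.getLast? with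
    | none => none
    | some v => if v = "" then none else some v
  let data : Option String :=
    if data_parts = [] then none else some (PySem.Str.join "\n" data_parts)
  (event_id, event_type, data)

-- ===== PRECONDITION & SPEC =====
def Spec_parse_sse_block (block : String) (out : Option Int × Option String × Option String) : Prop := out = parse_sse_block_alt block
instance (block : String) (out : Option Int × Option String × Option String) : Decidable (Spec_parse_sse_block block out) := by unfold Spec_parse_sse_block; infer_instance

-- ===== CLAIM (what is proved, stated in full; the proofs are below) =====
def Claim_equal_parse_sse_block : Prop := ∀ (block : String), Dom_parse_sse_block block → Spec_parse_sse_block block (parse_sse_block block)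

-- ===== LEMMAS AND PROOFS =====

-- a line starting with prefix p whose first character is c has first character c
theorem pv_head_of_startswith (s p : String) (h : PySem.Str.startswith s p = true)
    (c : Char) (cs : List Char) (hp : p.toList = c :: cs) : s.toList.head? = some c := by
  rw [PySem.Str.startswith_eq, PySem.Chars.startswith_iff] at h
  obtain ⟨t, e⟩ := h
  rw [← e, hp]
  simp

-- A's fold, from any start state, ends at B's per-field values (with the start state as the
-- fallback for the two last-writer-wins fields, and data appended at the back).
theorem parse_sse_fold_eq (ls : List String) (i : Option Int) (e : Option String) (d : List String) :
    ls.foldl parse_sse_step (i, e, d) =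
      let lines := (ls.map (fun l => PySem.Str.stripChars l "\r")).filter
          (fun l => !(l == "") && !PySem.Str.startswith l ":")
      ((match ((lines.filter (fun l => PySem.Str.startswith l "id:")).map
            (fun l => PySem.Str.strip (PySem.Str.slice l (some 3) none))).getLast? with
        | none => i
        | some v => PySem.Int.ofStr? v),
       (match ((lines.filter (fun l => PySem.Str.startswith l "event:")).map
            (fun l => PySem.Str.strip (PySem.Str.slice l (some 6) none))).getLast? with
        | none => e
        | some v => if v = "" then none else some v),
       d ++ ((lines.filter (fun l => PySem.Str.startswith l "data:")).map
            (fun l => PySem.Str.strip (PySem.Str.slice l (some 5) none)))) := by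
  induction ls generalizing i e d with
  | nil => simp
  | cons hd tl ih =>
    simp only [List.map_cons, List.foldl_cons, List.filter_cons]
    by_cases h0 : (PySem.Str.stripChars hd "\r" == "" || PySem.Str.startswith (PySem.Str.stripChars hd "\r") ":") = true
    · -- dropped line (empty or comment): both the step and the filter ignore it
      have hstep : parse_sse_step (i, e, d) hd = (i, e, d) := by
        simp only [parse_sse_step]
        rw [if_pos h0]
      have hf : (!(PySem.Str.stripChars hd "\r" == "") && !PySem.Str.startswith (PySem.Str.stripChars hd "\r") ":") = false := by
        cases hx : (PySem.Str.stripChars hd "\r" == "") with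
        | true => rfl
        | false =>
          have hy : PySem.Str.startswith (PySem.Str.stripChars hd "\r") ":" = true := by
            rw [hx] at h0; simpa using h0
          rw [hy]; rfl
      rw [hf, if_neg (by simp), hstep, ih]
    · -- kept line
      rw [Bool.not_eq_true, Bool.or_eq_false_iff] at h0
      obtain ⟨hne, hnc⟩ := h0
      have hnot : ¬((PySem.Str.stripChars hd "\r" == "" || PySem.Str.startswith (PySem.Str.stripChars hd "\r") ":") = true) := by
        rw [hne, hnc]; simp
      have hf : (!(PySem.Str.stripChars hd "\r" == "") && !PySem.Str.startswith (PySem.Str.stripChars hd "\r") ":") = true := by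
        rw [hne, hnc]; rfl
      rw [hf, if_pos rfl]
      simp only [List.filter_cons]
      by_cases hid : PySem.Str.startswith (PySem.Str.stripChars hd "\r") "id:" = true
      · have hh := pv_head_of_startswith _ _ hid 'i' ['d', ':'] (by decide)
        have hev : PySem.Str.startswith (PySem.Str.stripChars hd "\r") "event:" = false := by
          by_contra hc
          rw [Bool.not_eq_false] at hc
          have := pv_head_of_startswith _ _ hc 'e' ['v', 'e', 'n', 't', ':'] (by decide)
          rw [hh] at this; simp at this
        have hda : PySem.Str.startswith (PySem.Str.stripChars hd "\r") "data:" = false := by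
          by_contra hc
          rw [Bool.not_eq_false] at hc
          have := pv_head_of_startswith _ _ hc 'd' ['a', 't', 'a', ':'] (by decide)
          rw [hh] at this; simp at this
        have hstep : parse_sse_step (i, e, d) hd =
            (PySem.Int.ofStr? (PySem.Str.strip (PySem.Str.slice (PySem.Str.stripChars hd "\r") (some 3) none)), e, d) := by
          simp only [parse_sse_step]
          rw [if_neg hnot, if_pos hid]
        rw [hid, if_pos rfl, hev, if_neg (by simp), hda, if_neg (by simp), hstep, ih]
        simp only [List.map_cons, List.getLast?_cons]
        cases ((((tl.map (fun l => PySem.Str.stripChars l "\r")).filter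
            (fun l => !(l == "") && !PySem.Str.startswith l ":")).filter
            (fun l => PySem.Str.startswith l "id:")).map
            (fun l => PySem.Str.strip (PySem.Str.slice l (some 3) none))).getLast? <;> rfl
      · rw [Bool.not_eq_true] at hid
        by_cases hev : PySem.Str.startswith (PySem.Str.stripChars hd "\r") "event:" = true
        · have hh := pv_head_of_startswith _ _ hev 'e' ['v', 'e', 'n', 't', ':'] (by decide)
          have hda : PySem.Str.startswith (PySem.Str.stripChars hd "\r") "data:" = false := by
            by_contra hc
            rw [Bool.not_eq_false] at hc
            have := pv_head_of_startswith _ _ hc 'd' ['a', 't', 'a', ':'] (by decide)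
            rw [hh] at this; simp at this
          have hstep : parse_sse_step (i, e, d) hd =
              (i, (if PySem.Str.strip (PySem.Str.slice (PySem.Str.stripChars hd "\r") (some 6) none) = "" then none
                   else some (PySem.Str.strip (PySem.Str.slice (PySem.Str.stripChars hd "\r") (some 6) none))), d) := by
            simp only [parse_sse_step]
            rw [if_neg hnot, if_neg (by rw [hid]; simp), if_pos hev]
          rw [hid, if_neg (by simp), hev, if_pos rfl, hda, if_neg (by simp), hstep, ih]
          simp only [List.map_cons, List.getLast?_cons]
          cases ((((tl.map (fun l => PySem.Str.stripChars l "\r")).filter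
              (fun l => !(l == "") && !PySem.Str.startswith l ":")).filter
              (fun l => PySem.Str.startswith l "event:")).map
              (fun l => PySem.Str.strip (PySem.Str.slice l (some 6) none))).getLast? <;> rfl
        · rw [Bool.not_eq_true] at hev
          by_cases hda : PySem.Str.startswith (PySem.Str.stripChars hd "\r") "data:" = true
          · have hstep : parse_sse_step (i, e, d) hd =
                (i, e, d ++ [PySem.Str.strip (PySem.Str.slice (PySem.Str.stripChars hd "\r") (some 5) none)]) := by
              simp only [parse_sse_step]
              rw [if_neg hnot, if_neg (by rw [hid]; simp), if_neg (by rw [hev]; simp), if_pos hda]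
            rw [hid, if_neg (by simp), hev, if_neg (by simp), hda, if_pos rfl, hstep, ih]
            simp only [List.map_cons, List.append_assoc, List.singleton_append]
          · rw [Bool.not_eq_true] at hda
            have hstep : parse_sse_step (i, e, d) hd = (i, e, d) := by
              simp only [parse_sse_step]
              rw [if_neg hnot, if_neg (by rw [hid]; simp), if_neg (by rw [hev]; simp), if_neg (by rw [hda]; simp)]
            rw [hid, if_neg (by simp), hev, if_neg (by simp), hda, if_neg (by simp), hstep, ih]

-- ===== VERDICT (by name: the statement is the Claim_ definition above) =====
theorem parse_sse_block_spec : Claim_equal_parse_sse_block := by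
  intro block _
  unfold Spec_parse_sse_block parse_sse_block parse_sse_block_alt
  rw [parse_sse_fold_eq]
  simp only [List.nil_append]
  split_ifs with h h2 h3 <;>
    first
      | rfl
      | (obtain ⟨h1, hev, hid⟩ := h;
         first
           | exact absurd h1 (by assumption)
           | rw [hid, hev])
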